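-- pv_equiv track=rewrite | github.com/daviddjklm5/clawcheck | automation/flows/permission_collect_flow.py | _normalize_row_cells
-- ===== SOURCE A (Python) =====
-- from collections.abc import Sequence
--
-- def _normalize_row_cells(headers: Sequence[str], row: Sequence[str]) -> list[str]:
--     normalized = list(row)
--     while len(normalized) > len(headers) and normalized and not normalized[0]:
--         normalized.pop(0)
--     if len(normalized) > len(headers):
--         normalized = normalized[: len(headers)]
--     if len(normalized) < len(headers):
--         normalized.extend([""] * (len(headers) - len(normalized)))
--     return normalized
-- ===== SOURCE B (Python) =====
-- def _normalize_row_cells(headers, row):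
--     cells = list(row)
--     n = len(headers)
--     overflow = len(cells) - n
--     drop = 0
--     while drop < overflow and not cells[drop]:
--         drop += 1
--     cells = cells[drop:]
--     return (cells[:n] + [""] * n)[:n]
-- ===== Notes on version B (the rewrite author's own statement) =====
-- stated objective: simpler
-- what changed: Replaces the repeated pop(0) loop by an index count of leading empties followed by one slice, and collapses the separate truncate and pad branches into a single pad-then-truncate expression.
import Mathlib
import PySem

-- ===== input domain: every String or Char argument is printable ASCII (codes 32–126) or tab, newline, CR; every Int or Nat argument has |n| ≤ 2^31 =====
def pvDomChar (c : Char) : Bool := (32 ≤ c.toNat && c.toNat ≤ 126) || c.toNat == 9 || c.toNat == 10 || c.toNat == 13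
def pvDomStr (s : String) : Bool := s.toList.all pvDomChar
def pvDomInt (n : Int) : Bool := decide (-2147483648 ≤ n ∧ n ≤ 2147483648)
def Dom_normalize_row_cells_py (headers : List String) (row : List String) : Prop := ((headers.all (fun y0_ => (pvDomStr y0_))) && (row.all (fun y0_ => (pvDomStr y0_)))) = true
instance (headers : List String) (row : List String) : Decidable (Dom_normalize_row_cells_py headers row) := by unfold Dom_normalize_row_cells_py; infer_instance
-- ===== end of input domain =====

-- B replaces the repeated pop(0) loop by an index count of leading empties plus one slice,
-- and collapses the truncate/pad branches into a single pad-then-truncate expression (simpler).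


-- ===== PORT A =====
-- the while loop: pop the first cell while the list is longer than headers and its head is empty
def pvLoopA (n : Nat) (xs : List String) : List String :=
  match xs with
  | [] => []
  | x :: rest => if xs.length > n ∧ x = "" then pvLoopA n rest else xs

def normalize_row_cells_py (headers : List String) (row : List String) : List String :=
  let normalized := pvLoopA headers.length row
  let normalized :=
    if normalized.length > headers.length then normalized.take headers.length else normalized
  if normalized.length < headers.length then
    normalized ++ List.replicate (headers.length - normalized.length) ""
  else normalized

-- ===== PORT B =====
-- count-then-slice: drop at most `overflow` leading empty cells
def pvDropB (overflow : Nat) (cells : List String) : List String :=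
  match overflow, cells with
  | 0, cells => cells
  | _, [] => []
  | k + 1, c :: rest => if c = "" then pvDropB k rest else c :: rest

def normalize_row_cells_py_alt (headers : List String) (row : List String) : List String :=
  let n := headers.length
  let overflow := row.length - n
  let cells := pvDropB overflow row
  (cells.take n ++ List.replicate n "").take n

-- ===== PRECONDITION & SPEC =====
def Spec_normalize_row_cells_py (headers : List String) (row : List String) (out : List String) : Prop := out = normalize_row_cells_py_alt headers row
instance (headers : List String) (row : List String) (out : List String) : Decidable (Spec_normalize_row_cells_py headers row out) := by unfold Spec_normalize_row_cells_py; infer_instance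

-- ===== CLAIM (what is proved, stated in full; the proofs are below) =====
def Claim_equal_normalize_row_cells_py : Prop := ∀ (headers : List String) (row : List String), Dom_normalize_row_cells_py headers row → Spec_normalize_row_cells_py headers row (normalize_row_cells_py headers row)

-- ===== LEMMAS AND PROOFS =====
-- the two drop loops agree: A pops while longer than n, B drops up to overflow = len - n
theorem pvLoop_eq (n : Nat) : ∀ (xs : List String), pvLoopA n xs = pvDropB (xs.length - n) xs := by
  intro xs
  induction xs with
  | nil => simp [pvLoopA, pvDropB]
  | cons x rest ih =>
    by_cases h : (x :: rest).length > n
    · have hk : (x :: rest).length - n = (rest.length - n) + 1 := by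
        simp only [List.length_cons] at h ⊢; omega
      by_cases hx : x = ""
      · rw [hk, show pvLoopA n (x :: rest) = pvLoopA n rest from by
          rw [pvLoopA, if_pos ⟨h, hx⟩], ih, pvDropB, if_pos hx]
      · rw [hk, show pvLoopA n (x :: rest) = x :: rest from by
          rw [pvLoopA, if_neg (fun hc => hx hc.2)], pvDropB, if_neg hx]
    · have hk : (x :: rest).length - n = 0 := by
        simp only [List.length_cons] at h ⊢; omega
      rw [hk, show pvLoopA n (x :: rest) = x :: rest from by
        rw [pvLoopA, if_neg (fun hc => h hc.1)], pvDropB]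

-- pad-then-truncate equals the branchy truncate/pad
theorem fit_eq (n : Nat) (ys : List String) :
    (if (if ys.length > n then ys.take n else ys).length < n then
      (if ys.length > n then ys.take n else ys) ++
        List.replicate (n - (if ys.length > n then ys.take n else ys).length) ""
     else (if ys.length > n then ys.take n else ys))
    = (ys.take n ++ List.replicate n "").take n := by
  by_cases h : ys.length > n
  · have hlen : (ys.take n).length = n := by simp; omega
    rw [if_pos h, hlen, if_neg (lt_irrefl n),
      List.take_append_of_le_length (le_of_eq hlen.symm), List.take_take, min_self]
  · have hys : ys.take n = ys := List.take_of_length_le (Nat.not_lt.mp h)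
    rw [if_neg h, List.take_append, hys, List.take_replicate]
    by_cases h2 : ys.length < n
    · rw [if_pos h2, min_eq_left (Nat.sub_le n ys.length), hys]
    · have he : ys.length = n := le_antisymm (Nat.not_lt.mp h) (Nat.not_lt.mp h2)
      rw [if_neg h2, he, Nat.sub_self, hys]
      simp

-- ===== VERDICT (by name: the statement is the Claim_ definition above) =====
theorem normalize_row_cells_py_spec : Claim_equal_normalize_row_cells_py := by
  intro headers row _
  unfold Spec_normalize_row_cells_py normalize_row_cells_py normalize_row_cells_py_alt
  simp only [pvLoop_eq]
  exact fit_eq headers.length (pvDropB (row.length - headers.length) row)
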